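-- pv_equiv track=rewrite | github.com/goncalocapelalopes/adventofcode2021 | Day 15/part_2_sol.py | build_cave
-- ===== SOURCE A (Python) =====
-- def new_val(val, add):
--     if val + add >= 10:
--         return val + add - 9
--     else:
--         return val + add
--
-- def build_cave(lines):
--     new_lines = []
--     for new_row_i in range(5):
--
--         for row_i in range(len(lines)):
--             new_row = []
--             for new_col_i in range(5):
--                 for col_i in range(len(lines[0])):
--                     new_row.append(new_val(lines[row_i][col_i], new_row_i+new_col_i))
--             new_lines.append(new_row)
--     return new_lines
-- ===== SOURCE B (Python) =====
-- def build_cave(lines):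
--     width = len(lines[0]) if lines else 0
--     # for each original row, precompute its 9 possible wrapped shifts once
--     shifted = [[[v + a - 9 if v + a >= 10 else v + a for v in row[:width]]
--                 for a in range(9)]
--                for row in lines]
--     return [[x for j in range(5) for x in s[i + j]]
--             for i in range(5) for s in shifted]
-- ===== Notes on version B (the rewrite author's own statement) =====
-- stated objective: alternative
-- what changed: B precomputes for each original row its 9 wrapped shifts once and assembles the 25 tiles from those precomputed rows via comprehensions, instead of recomputing new_val cell by cell in four nested append loops.
import Mathlib
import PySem

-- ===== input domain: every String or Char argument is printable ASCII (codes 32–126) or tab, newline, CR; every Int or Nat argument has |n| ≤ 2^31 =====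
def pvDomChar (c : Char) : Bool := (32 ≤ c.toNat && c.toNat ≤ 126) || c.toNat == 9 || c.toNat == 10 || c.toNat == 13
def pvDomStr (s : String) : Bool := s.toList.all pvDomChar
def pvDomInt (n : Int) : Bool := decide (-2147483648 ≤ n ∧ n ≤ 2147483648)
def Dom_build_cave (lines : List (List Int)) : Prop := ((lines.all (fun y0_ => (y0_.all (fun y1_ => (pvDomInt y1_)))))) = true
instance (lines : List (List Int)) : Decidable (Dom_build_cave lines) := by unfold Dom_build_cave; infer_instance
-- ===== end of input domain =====

-- B precomputes each row's 9 wrapped shifts once and assembles the 25 tiles from them (a different decomposition, same cost); proved equal to A wherever A returns.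

-- ===== PORT A =====
def new_val (val add : Int) : Int :=
  if val + add ≥ 10 then val + add - 9 else val + add

def build_cave (lines : List (List Int)) : List (List Int) :=
  (PySem.List.pyRange 0 5 1).foldl (fun new_lines new_row_i =>
    (PySem.List.pyRange 0 (lines.length : Int) 1).foldl (fun new_lines row_i =>
      new_lines ++ [ (PySem.List.pyRange 0 5 1).foldl (fun new_row new_col_i =>
        (PySem.List.pyRange 0 ((lines.headD []).length : Int) 1).foldl (fun new_row col_i =>
          new_row ++ [ new_val (PySem.List.pyGetD (PySem.List.pyGetD lines row_i []) col_i 0) (new_row_i + new_col_i) ]) new_row) [] ]) new_lines) []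

-- ===== PORT B =====
def pvWrap (v a : Int) : Int :=
  if v + a ≥ 10 then v + a - 9 else v + a

def build_cave_alt (lines : List (List Int)) : List (List Int) :=
  let width : Int := if lines = [] then 0 else ((lines.headD []).length : Int)
  let shifted : List (List (List Int)) :=
    lines.map (fun row =>
      (PySem.List.pyRange 0 9 1).map (fun a =>
        (PySem.List.slice row none (some width)).map (fun v => pvWrap v a)))
  (PySem.List.pyRange 0 5 1).flatMap (fun i =>
    shifted.map (fun s =>
      (PySem.List.pyRange 0 5 1).flatMap (fun j =>
        PySem.List.pyGetD s (i + j) [])))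

-- ===== PRECONDITION & SPEC =====
-- Pre_ excludes exactly the ragged inputs on which A raises IndexError: some row shorter than the first row.
def Pre_build_cave (lines : List (List Int)) : Prop :=
  ∀ row ∈ lines, (lines.headD []).length ≤ row.length
instance (lines : List (List Int)) : Decidable (Pre_build_cave lines) := by
  unfold Pre_build_cave; infer_instance
def pvWitness_build_cave : List (List Int) := [[1, 9], [2, 8]]

def Spec_build_cave (lines : List (List Int)) (out : List (List Int)) : Prop := out = build_cave_alt lines
instance (lines : List (List Int)) (out : List (List Int)) : Decidable (Spec_build_cave lines out) := by unfold Spec_build_cave; infer_instance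

-- ===== CLAIM (what is proved, stated in full; the proofs are below) =====
def Claim_equal_build_cave : Prop := ∀ (lines : List (List Int)), Dom_build_cave lines → Pre_build_cave lines → Spec_build_cave lines (build_cave lines)

-- ===== LEMMAS AND PROOFS =====

-- common normal form of both programs
def pvCommon (lines : List (List Int)) : List (List Int) :=
  (PySem.List.pyRange 0 5 1).flatMap (fun i =>
    lines.map (fun row =>
      (PySem.List.pyRange 0 5 1).flatMap (fun j =>
        (row.take (lines.headD []).length).map (fun v => new_val v (i + j)))))

theorem pv_flatMap_fun_ext {a b : Type} (l : List a) (f g : a -> List b)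
    (h : forall x, f x = g x) : l.flatMap f = l.flatMap g := by
  rw [show f = g from funext h]

theorem pv_flatMap_mem_ext {a b : Type} (l : List a) (f g : a -> List b)
    (h : forall x, x ∈ l -> f x = g x) : l.flatMap f = l.flatMap g := by
  induction l with
  | nil => rfl
  | cons y ys ih =>
    simp only [List.flatMap_cons]
    rw [h y (by simp), ih (fun x hx => h x (by simp [hx]))]

theorem pv_map_idx_full (xs : List Int) (f : Int -> Int) :
    (PySem.List.pyRange 0 (xs.length : Int) 1).map (fun c => f (PySem.List.pyGetD xs c 0))
      = xs.map f := by
  conv_rhs => rw [← PySem.List.map_pyGetD_pyRange_zero' xs (0 : Int)]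
  rw [List.map_map]
  rfl

theorem pv_take_map_idx (row : List Int) (w : Nat) (hw : w ≤ row.length) (f : Int -> Int) :
    (PySem.List.pyRange 0 (w : Int) 1).map (fun c => f (PySem.List.pyGetD row c 0))
      = (row.take w).map f := by
  have hlen : (row.take w).length = w := by simp [hw]
  have h1 : (PySem.List.pyRange 0 (w : Int) 1).map (fun c => f (PySem.List.pyGetD row c 0))
      = (PySem.List.pyRange 0 (w : Int) 1).map (fun c => f (PySem.List.pyGetD (row.take w) c 0)) := by
    apply List.map_congr_left
    intro c hc
    rw [PySem.List.mem_pyRange_one] at hc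
    rw [PySem.List.pyGetD_eq_getElem row 0 hc.1 (by omega),
        PySem.List.pyGetD_eq_getElem (row.take w) 0 hc.1 (by push_cast [hlen]; omega)]
    congr 1
    rw [List.getElem_take]
  have h2 := pv_map_idx_full (row.take w) f
  rw [hlen] at h2
  rw [h1, h2]

theorem pv_A_norm (lines : List (List Int)) (h : Pre_build_cave lines) :
    build_cave lines = pvCommon lines := by
  unfold build_cave pvCommon
  simp only [PySem.List.foldl_append_singleton_eq_map, PySem.List.foldl_append_eq_flatMap,
    List.nil_append]
  apply pv_flatMap_fun_ext
  intro i
  have hmm : (PySem.List.pyRange 0 (lines.length : Int) 1).map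
      (fun r => PySem.List.pyGetD lines r ([] : List Int)) = lines :=
    PySem.List.map_pyGetD_pyRange_zero' ..
  calc (PySem.List.pyRange 0 (lines.length : Int) 1).map
        (fun r => (PySem.List.pyRange 0 5 1).flatMap (fun j =>
          (PySem.List.pyRange 0 ((lines.headD []).length : Int) 1).map
            (fun c => new_val (PySem.List.pyGetD (PySem.List.pyGetD lines r []) c 0) (i + j))))
      = ((PySem.List.pyRange 0 (lines.length : Int) 1).map
          (fun r => PySem.List.pyGetD lines r ([] : List Int))).map
          (fun row => (PySem.List.pyRange 0 5 1).flatMap (fun j =>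
            (PySem.List.pyRange 0 ((lines.headD []).length : Int) 1).map
              (fun c => new_val (PySem.List.pyGetD row c 0) (i + j)))) := by
        rw [List.map_map]
        rfl
    _ = lines.map (fun row => (PySem.List.pyRange 0 5 1).flatMap (fun j =>
          (row.take (lines.headD []).length).map (fun v => new_val v (i + j)))) := by
        rw [hmm]
        apply List.map_congr_left
        intro row hrow
        apply pv_flatMap_fun_ext
        intro j
        exact pv_take_map_idx row _ (h row hrow) (fun v => new_val v (i + j))

theorem pv_B_norm (lines : List (List Int)) :
    build_cave_alt lines = pvCommon lines := by
  cases lines with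
  | nil => decide
  | cons r rest =>
    unfold build_cave_alt pvCommon
    simp only [List.cons_ne_nil, if_false, List.headD_cons, List.map_map]
    apply pv_flatMap_mem_ext
    intro i hi
    rw [PySem.List.mem_pyRange_one] at hi
    apply List.map_congr_left
    intro row hrow
    apply pv_flatMap_mem_ext
    intro j hj
    rw [PySem.List.mem_pyRange_one] at hj
    rw [PySem.List.pyGetD_map_pyRange_of_nonneg _ 9 (i + j) _ (by omega) (by omega)]
    rw [PySem.List.slice_to_natCast]
    rfl


-- ===== VERDICT (by name: the statement is the Claim_ definition above) =====
theorem build_cave_spec : Claim_equal_build_cave := by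
  intro lines _ hpre
  unfold Spec_build_cave
  rw [pv_A_norm lines hpre, pv_B_norm lines]
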